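-- pv_equiv track=rewrite | github.com/ganghe74/algo | foobar/solar-doomsday/solution.py | solution
-- ===== SOURCE A (Python) =====
-- def solution(area):
--     ans = []
--     i = 1000
--     while area > 0:
--         while area >= i*i:
--             area -= i*i
--             ans.append(i*i)
--         i -= 1
--     return ans
-- ===== SOURCE B (Python) =====
-- def solution(area):
--     ans = []
--     while area > 0:
--         # binary search the largest i in [1,1000] with i*i <= area
--         lo, hi = 1, 1001
--         while lo + 1 < hi:
--             mid = (lo + hi) // 2
--             if mid * mid <= area:
--                 lo = mid
--             else:
--                 hi = mid
--         sq = lo * lo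
--         area -= sq
--         ans.append(sq)
--     return ans
-- ===== Notes on version B (the rewrite author's own statement) =====
-- stated objective: alternative
-- what changed: A scans candidate sides downward from the cap with a nested subtract-loop per side; B instead binary-searches, on each step, for the largest capped side whose square still fits, and subtracts that square - no downward scan.
import Mathlib
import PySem

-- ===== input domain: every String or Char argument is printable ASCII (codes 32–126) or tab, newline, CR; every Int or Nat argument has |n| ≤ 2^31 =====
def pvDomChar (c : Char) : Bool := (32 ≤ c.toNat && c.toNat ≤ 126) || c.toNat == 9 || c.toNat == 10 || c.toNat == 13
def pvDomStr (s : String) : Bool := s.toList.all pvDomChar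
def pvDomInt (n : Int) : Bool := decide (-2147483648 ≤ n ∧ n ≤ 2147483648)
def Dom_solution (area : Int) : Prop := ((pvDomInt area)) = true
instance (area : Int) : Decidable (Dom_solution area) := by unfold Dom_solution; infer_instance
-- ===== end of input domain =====

-- B replaces A's downward scan of candidate sides by a per-step binary search for the
-- largest usable square (objective: alternative; same results, different algorithm).

-- ===== PORT A =====
-- inner 'while area >= i*i' loop of A; fuel = area.toNat suffices (each pass removes i*i ≥ 1)
def solutionInner (fuel : Nat) (i area : Int) (ans : List Int) : Int × List Int :=
  match fuel with
  | 0 => (area, ans)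
  | f + 1 =>
    if area ≥ i * i then solutionInner f i (area - i * i) (ans ++ [i * i])
    else (area, ans)

-- outer 'while area > 0' loop of A; i counts 1000, 999, …, fuel = 1001 covers every i reached
def solutionOuter (fuel : Nat) (i area : Int) (ans : List Int) : List Int :=
  match fuel with
  | 0 => ans
  | f + 1 =>
    if area > 0 then
      let p := solutionInner area.toNat i area ans
      solutionOuter f (i - 1) p.1 p.2
    else ans

def solution (area : Int) : List Int := solutionOuter 1001 1000 area []

-- ===== PORT B =====
-- inner binary search of Source B: largest i in [1,1000] with i*i ≤ area; fuel 11 since hi-lo ≤ 1000 < 2^10 halves each step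
def solutionBsearch (fuel : Nat) (area lo hi : Int) : Int :=
  match fuel with
  | 0 => lo
  | f + 1 =>
    if lo + 1 < hi then
      let mid := PySem.Int.floordiv (lo + hi) 2
      if mid * mid ≤ area then solutionBsearch f area mid hi
      else solutionBsearch f area lo mid
    else lo

-- outer 'while area > 0' loop of Source B; fuel = area.toNat + 1 suffices (each pass removes lo*lo ≥ 1)
def solutionAltLoop (fuel : Nat) (area : Int) (ans : List Int) : List Int :=
  match fuel with
  | 0 => ans
  | f + 1 =>
    if area > 0 then
      let lo := solutionBsearch 11 area 1 1001
      solutionAltLoop f (area - lo * lo) (ans ++ [lo * lo])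
    else ans

def solution_alt (area : Int) : List Int := solutionAltLoop (area.toNat + 1) area []

-- ===== PRECONDITION & SPEC =====
def Spec_solution (area : Int) (out : List Int) : Prop := out = solution_alt area
instance (area : Int) (out : List Int) : Decidable (Spec_solution area out) := by unfold Spec_solution; infer_instance

-- ===== CLAIM (what is proved, stated in full; the proofs are below) =====
def Claim_equal_solution : Prop := ∀ (area : Int), Dom_solution area → Spec_solution area (solution area)

-- ===== LEMMAS AND PROOFS =====

-- canonical greedy decomposition (largest square with side capped at 1000), as a spec both ports meet
def gSpec (n : Nat) : List Int :=
  if _h : n = 0 then []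
  else
    let i := min (Nat.sqrt n) 1000
    ((i * i : Nat) : Int) :: gSpec (n - i * i)
termination_by n
decreasing_by
  have h1 : 1 ≤ Nat.sqrt n := Nat.le_sqrt.mpr (by omega)
  exact Nat.sub_lt (by omega) (by have : 1 ≤ min (Nat.sqrt n) 1000 := le_min h1 (by omega); nlinarith)

lemma gSpec_zero : gSpec 0 = [] := by simp [gSpec]

-- the side i with i² ≤ area and (area < (i+1)² or i = 1000) is exactly min (sqrt area) 1000
lemma cap_sqrt_eq (i area : Int) (h1 : 1 ≤ i) (h2 : i ≤ 1000)
    (h3 : i * i ≤ area) (h4 : area < (i + 1) * (i + 1) ∨ i = 1000) :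
    ((min (Nat.sqrt area.toNat) 1000 : Nat) : Int) = i := by
  have hn : (area.toNat : Int) = area := Int.toNat_of_nonneg (by nlinarith)
  have hle : i.toNat * i.toNat ≤ area.toNat := by
    have : (i.toNat : Int) * i.toNat ≤ (area.toNat : Int) := by
      rw [hn]; rw [Int.toNat_of_nonneg (by omega)]; exact h3
    exact_mod_cast this
  have hsq_ge : i.toNat ≤ Nat.sqrt area.toNat := Nat.le_sqrt.mpr hle
  rcases h4 with h4 | h4
  · have hlt : area.toNat < (i.toNat + 1) * (i.toNat + 1) := by
      have : (area.toNat : Int) < ((i.toNat : Int) + 1) * ((i.toNat : Int) + 1) := by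
        rw [hn, Int.toNat_of_nonneg (by omega)]; exact h4
      exact_mod_cast this
    have hsq_lt : Nat.sqrt area.toNat < i.toNat + 1 := Nat.sqrt_lt'.mpr (by nlinarith)
    have hs : Nat.sqrt area.toNat = i.toNat := by omega
    have hi1000 : i.toNat ≤ 1000 := by omega
    rw [hs, Nat.min_eq_left hi1000, Int.toNat_of_nonneg (by omega)]
  · have hs : 1000 ≤ Nat.sqrt area.toNat := by
      subst h4; simpa using hsq_ge
    rw [Nat.min_eq_right hs]; omega

-- one unfolding of gSpec at a positive n whose capped sqrt is i
lemma gSpec_step (i area : Int) (h1 : 1 ≤ i) (h2 : i ≤ 1000)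
    (h3 : i * i ≤ area) (h4 : area < (i + 1) * (i + 1) ∨ i = 1000) :
    gSpec area.toNat = i * i :: gSpec (area - i * i).toNat := by
  have hpos : 0 < area := by nlinarith
  have hkey := cap_sqrt_eq i area h1 h2 h3 h4
  have hne : area.toNat ≠ 0 := by omega
  rw [gSpec]
  simp only [hne, dite_false]
  have hminNat : min (Nat.sqrt area.toNat) 1000 = i.toNat := by omega
  rw [hminNat]
  have hii : ((i.toNat * i.toNat : Nat) : Int) = i * i := by
    push_cast [Int.toNat_of_nonneg (show (0:Int) ≤ i by omega)]
    ring
  have hle2 : ((i.toNat * i.toNat : Nat) : Int) ≤ (area.toNat : Int) := by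
    rw [hii, Int.toNat_of_nonneg (by omega)]; exact h3
  have e2 : area.toNat - i.toNat * i.toNat = (area - i * i).toNat := by
    rw [← hii]
    generalize h : i.toNat * i.toNat = k at hle2 ⊢
    omega
  rw [hii, e2]


-- A's inner loop: leaves a remainder < i*i and its appends agree with gSpec
lemma inner_lemma : ∀ (fuel : Nat) (i area : Int) (ans : List Int),
    1 ≤ i → i ≤ 1000 → (area < (i + 1) * (i + 1) ∨ i = 1000) → area.toNat ≤ fuel →
    (solutionInner fuel i area ans).1 < i * i ∧
    (solutionInner fuel i area ans).1 ≤ area ∧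
    (solutionInner fuel i area ans).2 ++ gSpec (solutionInner fuel i area ans).1.toNat
      = ans ++ gSpec area.toNat := by
  intro fuel
  induction fuel with
  | zero =>
    intro i area ans h1 h2 h4 hf
    have ha : area ≤ 0 := by omega
    simp only [solutionInner]
    exact ⟨by nlinarith, le_refl _, by simp⟩
  | succ f ih =>
    intro i area ans h1 h2 h4 hf
    by_cases hc : area ≥ i * i
    · have hii1 : 1 ≤ i * i := by nlinarith
      have hstep : (area - i * i).toNat ≤ f := by
        generalize h : i * i = s at hii1 hc ⊢
        omega
      have h4' : area - i * i < (i + 1) * (i + 1) ∨ i = 1000 := by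
        rcases h4 with h4 | h4
        · exact Or.inl (by omega)
        · exact Or.inr h4
      obtain ⟨c1, c2, c3⟩ := ih i (area - i * i) (ans ++ [i * i]) h1 h2 h4' hstep
      have hred : solutionInner (f + 1) i area ans
          = solutionInner f i (area - i * i) (ans ++ [i * i]) := by
        simp [solutionInner, hc]
      rw [hred]
      refine ⟨c1, by omega, ?_⟩
      rw [c3, gSpec_step i area h1 h2 hc h4]
      simp
    · have hred : solutionInner (f + 1) i area ans = (area, ans) := by
        simp [solutionInner, hc]
      rw [hred]
      exact ⟨by omega, le_refl _, rfl⟩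

-- A's outer loop meets gSpec under the invariant that no side above i can fit (or i = 1000)
lemma outer_lemma : ∀ (fuel : Nat) (i area : Int) (ans : List Int),
    0 ≤ i → i ≤ 1000 → (area < (i + 1) * (i + 1) ∨ i = 1000) → i.toNat + 1 ≤ fuel →
    solutionOuter fuel i area ans = ans ++ gSpec area.toNat := by
  intro fuel
  induction fuel with
  | zero => intro i area ans h0 h2 h4 hf; omega
  | succ f ih =>
    intro i area ans h0 h2 h4 hf
    by_cases harea : area > 0
    · have h1 : 1 ≤ i := by
        rcases h4 with h | h
        · by_contra hcon
          have hi0 : i = 0 := by omega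
          subst hi0; simp at h; omega
        · omega
      obtain ⟨c1, c2, c3⟩ := inner_lemma area.toNat i area ans h1 h2 h4 (le_refl _)
      have hred : solutionOuter (f + 1) i area ans
          = solutionOuter f (i - 1)
              (solutionInner area.toNat i area ans).1
              (solutionInner area.toNat i area ans).2 := by
        simp [solutionOuter, harea]
      rw [hred, ih (i - 1) _ _ (by omega) (by omega)
        (Or.inl (by simpa using c1)) (by omega), c3]
    · have hz : area.toNat = 0 := by omega
      simp [solutionOuter, harea, hz, gSpec_zero]

-- binary search returns the greatest side in [1,1000] whose square fits
lemma bsearch_lemma : ∀ (fuel : Nat) (area lo hi : Int),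
    1 ≤ lo → lo < hi → hi ≤ 1001 → hi - lo ≤ 2 ^ fuel →
    lo * lo ≤ area → (area < hi * hi ∨ hi = 1001) →
    1 ≤ solutionBsearch fuel area lo hi ∧ solutionBsearch fuel area lo hi ≤ 1000 ∧
    solutionBsearch fuel area lo hi * solutionBsearch fuel area lo hi ≤ area ∧
    (area < (solutionBsearch fuel area lo hi + 1) * (solutionBsearch fuel area lo hi + 1) ∨
      solutionBsearch fuel area lo hi = 1000) := by
  intro fuel
  induction fuel with
  | zero =>
    intro area lo hi h1 hlh h1001 hlen h5 h6
    have hhi : hi = lo + 1 := by simpa using hlen |> fun h => by omega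
    simp only [solutionBsearch]
    refine ⟨h1, by omega, h5, ?_⟩
    rcases h6 with h | h
    · exact Or.inl (by rw [← hhi]; exact h)
    · exact Or.inr (by omega)
  | succ f ih =>
    intro area lo hi h1 hlh h1001 hlen h5 h6
    by_cases hc : lo + 1 < hi
    · have hmid := (PySem.Int.floordiv_eq_iff_of_pos
        (a := lo + hi) (b := 2) (q := PySem.Int.floordiv (lo + hi) 2)
        (by norm_num)).mp rfl
      have hp : (2 : Int) ^ (f + 1) = 2 * 2 ^ f := by ring
      have hlo : lo < PySem.Int.floordiv (lo + hi) 2 := by omega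
      have hhi : PySem.Int.floordiv (lo + hi) 2 < hi := by omega
      have hhalf1 : hi - PySem.Int.floordiv (lo + hi) 2 ≤ 2 ^ f := by
        generalize hq : (2 : Int) ^ f = p at hp hlen
        omega
      have hhalf2 : PySem.Int.floordiv (lo + hi) 2 - lo ≤ 2 ^ f := by
        generalize hq : (2 : Int) ^ f = p at hp hlen
        omega
      have hred : solutionBsearch (f + 1) area lo hi
          = if PySem.Int.floordiv (lo + hi) 2 * PySem.Int.floordiv (lo + hi) 2 ≤ area
            then solutionBsearch f area (PySem.Int.floordiv (lo + hi) 2) hi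
            else solutionBsearch f area lo (PySem.Int.floordiv (lo + hi) 2) := by
        simp [solutionBsearch, hc]
      rw [hred]
      by_cases hsq : PySem.Int.floordiv (lo + hi) 2 * PySem.Int.floordiv (lo + hi) 2 ≤ area
      · rw [if_pos hsq]
        exact ih area _ hi (by omega) hhi h1001 hhalf1 hsq h6
      · rw [if_neg hsq]
        exact ih area lo _ h1 hlo (by omega) hhalf2 h5 (Or.inl (by omega))
    · have hhi : hi = lo + 1 := by omega
      have hred : solutionBsearch (f + 1) area lo hi = lo := by
        simp [solutionBsearch, hc]
      rw [hred]
      refine ⟨h1, by omega, h5, ?_⟩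
      rcases h6 with h | h
      · exact Or.inl (by rw [← hhi]; exact h)
      · exact Or.inr (by omega)

-- B's loop meets gSpec
lemma altLoop_lemma : ∀ (fuel : Nat) (area : Int) (ans : List Int),
    area.toNat + 1 ≤ fuel →
    solutionAltLoop fuel area ans = ans ++ gSpec area.toNat := by
  intro fuel
  induction fuel with
  | zero => intro area ans hf; omega
  | succ f ih =>
    intro area ans hf
    by_cases harea : area > 0
    · obtain ⟨b1, b2, b3, b4⟩ := bsearch_lemma 11 area 1 1001 (by omega) (by omega)
        (by omega) (by norm_num) (by omega) (Or.inr rfl)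
      have hfuel : (area - solutionBsearch 11 area 1 1001 * solutionBsearch 11 area 1 1001).toNat + 1 ≤ f := by
        have hii1 : 1 ≤ solutionBsearch 11 area 1 1001 * solutionBsearch 11 area 1 1001 := by nlinarith
        generalize h : solutionBsearch 11 area 1 1001 * solutionBsearch 11 area 1 1001 = s at hii1 b3 ⊢
        omega
      have hred : solutionAltLoop (f + 1) area ans
          = solutionAltLoop f (area - solutionBsearch 11 area 1 1001 * solutionBsearch 11 area 1 1001)
              (ans ++ [solutionBsearch 11 area 1 1001 * solutionBsearch 11 area 1 1001]) := by
        simp [solutionAltLoop, harea]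
      rw [hred, ih _ _ hfuel, gSpec_step _ area b1 b2 b3 b4]
      simp
    · have hz : area.toNat = 0 := by omega
      simp [solutionAltLoop, harea, hz, gSpec_zero]

-- ===== VERDICT (by name: the statement is the Claim_ definition above) =====
theorem solution_spec : Claim_equal_solution := by
  intro area _
  unfold Spec_solution solution solution_alt
  rw [outer_lemma 1001 1000 area [] (by omega) (by omega) (Or.inr rfl) (by norm_num),
      altLoop_lemma (area.toNat + 1) area [] (le_refl _)]
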